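-- pv_equiv track=rewrite | github.com/zyzhang1130/LifelongAgentBench | src/factories/data/standard_v0303/instance/knowledge_graph/grail_qa/processed_entry_factory.py | get_skill_list
-- ===== SOURCE A (Python) =====
-- from typing import Mapping, Sequence, Any
--
-- def get_skill_list(action_name_list: Sequence[str]) -> Sequence[str]:
--     skill_set: set[str] = set()
--     for action_name in action_name_list:
--         match action_name:
--             case "get_relations" | "get_attributes":
--                 pass
--             case "get_neighbors" | "intersection" | "argmax" | "argmin" | "count":
--                 skill_set.add(action_name)
--             case _:
--                 raise ValueError()
--     skill_list = sorted(list(skill_set))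
--     return skill_list
-- ===== SOURCE B (Python) =====
-- _SKILLS_SORTED = ("argmax", "argmin", "count", "get_neighbors", "intersection")
--
-- def get_skill_list(action_name_list):
--     for name in action_name_list:
--         if name not in _SKILLS_SORTED and name != "get_relations" and name != "get_attributes":
--             raise ValueError()
--     return [s for s in _SKILLS_SORTED if s in action_name_list]
-- ===== Notes on version B (the rewrite author's own statement) =====
-- stated objective: alternative
-- what changed: B builds no set and never sorts: after validating, it scans the fixed alphabetically-ordered table of the 5 skill names and keeps those present in the input, so the output order comes from the static table instead of sorting collected elements.
import Mathlib
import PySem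

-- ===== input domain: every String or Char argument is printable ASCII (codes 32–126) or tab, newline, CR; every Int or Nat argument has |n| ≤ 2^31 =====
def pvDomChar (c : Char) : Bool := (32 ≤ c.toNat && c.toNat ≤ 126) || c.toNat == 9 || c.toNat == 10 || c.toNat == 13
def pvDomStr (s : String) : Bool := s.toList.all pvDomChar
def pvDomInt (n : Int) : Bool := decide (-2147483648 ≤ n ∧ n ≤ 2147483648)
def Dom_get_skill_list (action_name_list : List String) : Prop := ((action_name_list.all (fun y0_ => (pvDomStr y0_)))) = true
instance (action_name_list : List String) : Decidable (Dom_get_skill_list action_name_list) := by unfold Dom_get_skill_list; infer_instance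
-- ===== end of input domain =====

-- B never builds a set and never sorts: it validates, then scans the fixed alphabetically-ordered
-- table of the 5 skill names keeping those present in the input (alternative decomposition, same cost).

-- ===== PORT A =====
-- A's loop: build a set of the skill names seen; an unknown name raises ValueError (modelled as none).
def pvSkillLoop (st : PySem.Set String) : List String → Option (PySem.Set String)
  | [] => some st
  | a :: rest =>
    if a = "get_relations" ∨ a = "get_attributes" then pvSkillLoop st rest
    else if a = "get_neighbors" ∨ a = "intersection" ∨ a = "argmax" ∨ a = "argmin" ∨ a = "count" then
      pvSkillLoop (PySem.Set.add st a) rest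
    else none

def get_skill_list (action_name_list : List String) : List String :=
  match pvSkillLoop PySem.Set.empty action_name_list with
  | some st => PySem.List.sorted st (fun x => x) false
  | none => []   -- unreachable under Pre_ (A raises ValueError here)

-- ===== PORT B =====
def pvSkillsSorted : List String := ["argmax", "argmin", "count", "get_neighbors", "intersection"]

def pvValidB (a : String) : Bool :=
  pvSkillsSorted.contains a || a == "get_relations" || a == "get_attributes"

def get_skill_list_alt (action_name_list : List String) : List String :=
  if action_name_list.all pvValidB then
    pvSkillsSorted.filter (fun s => action_name_list.contains s)
  else []   -- B raises ValueError here, outside Pre_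

-- ===== PRECONDITION & SPEC =====
-- Pre_: every action name is one of the 7 known names; on any other name A raises ValueError.
def Pre_get_skill_list (action_name_list : List String) : Prop :=
  ∀ a ∈ action_name_list,
    a = "get_relations" ∨ a = "get_attributes" ∨ a = "get_neighbors" ∨ a = "intersection" ∨
    a = "argmax" ∨ a = "argmin" ∨ a = "count"
instance (action_name_list : List String) : Decidable (Pre_get_skill_list action_name_list) := by
  unfold Pre_get_skill_list; infer_instance

def pvWitness_get_skill_list : List String :=
  ["get_relations", "count", "get_neighbors", "count", "argmin"]

def Spec_get_skill_list (action_name_list : List String) (out : List String) : Prop :=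
  out = get_skill_list_alt action_name_list
instance (action_name_list : List String) (out : List String) :
    Decidable (Spec_get_skill_list action_name_list out) := by
  unfold Spec_get_skill_list; infer_instance

-- ===== CLAIM (what is proved, stated in full; the proofs are below) =====
def Claim_equal_get_skill_list : Prop :=
  ∀ (action_name_list : List String), Dom_get_skill_list action_name_list →
    Pre_get_skill_list action_name_list →
    Spec_get_skill_list action_name_list (get_skill_list action_name_list)

-- ===== LEMMAS AND PROOFS =====

-- Characterisation of A's loop under Pre_: it succeeds, keeps Nodup, and the final set's
-- members are the initial ones plus the skill names occurring in the list.
lemma pvSkillLoop_spec (xs : List String) (st : PySem.Set String) (hnd : st.Nodup)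
    (hpre : ∀ a ∈ xs,
      a = "get_relations" ∨ a = "get_attributes" ∨ a = "get_neighbors" ∨ a = "intersection" ∨
      a = "argmax" ∨ a = "argmin" ∨ a = "count") :
    ∃ st', pvSkillLoop st xs = some st' ∧ st'.Nodup ∧
      ∀ y, y ∈ st' ↔ y ∈ st ∨ (y ∈ xs ∧ y ∈ pvSkillsSorted) := by
  induction xs generalizing st with
  | nil => exact ⟨st, rfl, hnd, by simp⟩
  | cons a rest ih =>
    have ha := hpre a (by simp)
    by_cases h1 : a = "get_relations" ∨ a = "get_attributes"
    · obtain ⟨st', heq, hnd', hmem⟩ := ih st hnd (fun b hb => hpre b (by simp [hb]))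
      refine ⟨st', by simp [pvSkillLoop, h1, heq], hnd', fun y => ?_⟩
      rw [hmem]
      constructor
      · rintro (h | ⟨h1', h2⟩)
        · exact Or.inl h
        · exact Or.inr ⟨by simp [h1'], h2⟩
      · rintro (h | ⟨h1', h2⟩)
        · exact Or.inl h
        · rcases List.mem_cons.mp h1' with h | h
          · exfalso; subst h
            rcases h1 with h | h <;> simp [h, pvSkillsSorted] at h2
          · exact Or.inr ⟨h, h2⟩
    · have h2 : a = "get_neighbors" ∨ a = "intersection" ∨ a = "argmax" ∨ a = "argmin" ∨ a = "count" := by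
        tauto
      have hsk : a ∈ pvSkillsSorted := by
        rcases h2 with h | h | h | h | h <;> simp [h, pvSkillsSorted]
      obtain ⟨st', heq, hnd', hmem⟩ :=
        ih (PySem.Set.add st a) (PySem.Set.nodup_add st a hnd)
          (fun b hb => hpre b (by simp [hb]))
      refine ⟨st', by simp [pvSkillLoop, h1, h2, heq], hnd', fun y => ?_⟩
      rw [hmem, PySem.Set.mem_add]
      constructor
      · rintro ((h | h) | ⟨h1', h2'⟩)
        · exact Or.inl h
        · exact Or.inr ⟨by simp [h], by subst h; exact hsk⟩
        · exact Or.inr ⟨by simp [h1'], h2'⟩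
      · rintro (h | ⟨h1', h2'⟩)
        · exact Or.inl (Or.inl h)
        · rcases List.mem_cons.mp h1' with h | h
          · exact Or.inl (Or.inr h)
          · exact Or.inr ⟨h, h2'⟩

lemma pvSkillsSorted_pairwise : pvSkillsSorted.Pairwise (· < ·) := by
  norm_num [pvSkillsSorted]
  refine ⟨?_, ?_, ?_, ?_⟩ <;> decide

-- ===== VERDICT (by name: the statement is the Claim_ definition above) =====
theorem get_skill_list_spec : Claim_equal_get_skill_list := by
  intro xs _ hpre
  unfold Spec_get_skill_list get_skill_list get_skill_list_alt
  obtain ⟨st', heq, hnd', hmem⟩ := pvSkillLoop_spec xs PySem.Set.empty (by simp [PySem.Set.empty]) hpre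
  rw [heq]
  have hall : xs.all pvValidB = true := by
    rw [List.all_eq_true]
    intro a ha
    rcases hpre a ha with h | h | h | h | h | h | h <;> simp [h, pvValidB, pvSkillsSorted]
  rw [if_pos hall]
  apply PySem.List.sorted_eq_of_perm_of_pairwise_lt
  · -- the filtered canonical table is a permutation of st'
    apply (List.perm_ext_iff_of_nodup (List.Nodup.filter _ (by decide)) hnd').mpr
    intro y
    simp only [List.mem_filter, hmem y, PySem.Set.empty]
    constructor
    · rintro ⟨hy1, hy2⟩
      exact Or.inr ⟨by simpa using hy2, hy1⟩
    · rintro (h | ⟨h1, h2⟩)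
      · simp at h
      · exact ⟨h2, by simpa using h1⟩
  · exact pvSkillsSorted_pairwise.filter _
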